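-- pv_equiv track=rewrite | github.com/christoforuswidodo/Hacker-Rank | Warmup/ServiceLane.py | maximumVehicleWidth
-- ===== SOURCE A (Python) =====
-- vehicle = [3, 2, 1]
--
-- def maximumVehicleWidth(service_width, i, j):
-- 	for trans in vehicle:
-- 		fitted = True
-- 		for width in service_width[i:j+1]:
-- 			if trans > width:
-- 				fitted = False
-- 				break
-- 		if fitted:
-- 			return trans
-- 	return 0
-- ===== SOURCE B (Python) =====
-- def maximumVehicleWidth(service_width, i, j):
--     seg = service_width[i:j+1]
--     if not seg:
--         return 3
--     m = min(seg)
--     if m >= 3: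
--         return 3
--     if m >= 2:
--         return 2
--     if m >= 1:
--         return 1
--     return 0
-- ===== Notes on version B (the rewrite author's own statement) =====
-- stated objective: simpler
-- what changed: Replaces A's up-to-three candidate scans over the slice with one min() computation followed by a constant-time classification (empty slice still yields 3).
import Mathlib
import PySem

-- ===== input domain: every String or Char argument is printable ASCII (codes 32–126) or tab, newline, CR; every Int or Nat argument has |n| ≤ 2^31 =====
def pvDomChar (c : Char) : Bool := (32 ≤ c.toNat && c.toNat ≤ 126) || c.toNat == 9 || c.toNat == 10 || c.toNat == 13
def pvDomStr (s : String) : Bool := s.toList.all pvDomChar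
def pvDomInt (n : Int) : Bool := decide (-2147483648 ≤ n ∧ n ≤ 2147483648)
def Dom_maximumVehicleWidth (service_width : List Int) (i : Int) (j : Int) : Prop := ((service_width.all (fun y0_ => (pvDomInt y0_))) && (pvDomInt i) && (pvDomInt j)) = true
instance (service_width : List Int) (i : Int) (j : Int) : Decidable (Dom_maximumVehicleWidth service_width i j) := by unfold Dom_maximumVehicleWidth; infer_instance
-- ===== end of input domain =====

-- B computes the slice's minimum once and classifies it, instead of A's repeated candidate scans (objective: simpler).
-- ===== PORT A =====
-- inner loop: fitted stays True unless some width < trans (break)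
def pvFitted (trans : Int) : List Int → Bool
  | [] => true
  | w :: ws => if trans > w then false else pvFitted trans ws

-- outer loop over vehicle = [3, 2, 1]; falls through to 0
def pvOuter (seg : List Int) : List Int → Int
  | [] => 0
  | t :: ts => if pvFitted t seg then t else pvOuter seg ts

def maximumVehicleWidth (service_width : List Int) (i : Int) (j : Int) : Int :=
  pvOuter (PySem.List.slice service_width (some i) (some (j + 1))) [3, 2, 1]

-- ===== PORT B =====
def maximumVehicleWidth_alt (service_width : List Int) (i : Int) (j : Int) : Int :=
  let seg := PySem.List.slice service_width (some i) (some (j + 1))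
  match PySem.List.min? seg (fun x => x) with
  | none => 3
  | some m => if m ≥ 3 then 3 else if m ≥ 2 then 2 else if m ≥ 1 then 1 else 0

-- ===== PRECONDITION & SPEC =====
def Spec_maximumVehicleWidth (service_width : List Int) (i : Int) (j : Int) (out : Int) : Prop := out = maximumVehicleWidth_alt service_width i j
instance (service_width : List Int) (i : Int) (j : Int) (out : Int) : Decidable (Spec_maximumVehicleWidth service_width i j out) := by unfold Spec_maximumVehicleWidth; infer_instance

-- ===== CLAIM (what is proved, stated in full; the proofs are below) =====
def Claim_equal_maximumVehicleWidth : Prop := ∀ (service_width : List Int) (i : Int) (j : Int), Dom_maximumVehicleWidth service_width i j → Spec_maximumVehicleWidth service_width i j (maximumVehicleWidth service_width i j)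

-- ===== LEMMAS AND PROOFS =====

theorem pvFitted_iff (t : Int) (seg : List Int) :
    pvFitted t seg = true ↔ ∀ w ∈ seg, t ≤ w := by
  induction seg with
  | nil => simp [pvFitted]
  | cons w ws ih =>
    simp only [pvFitted, List.mem_cons]
    by_cases h : t > w
    · simp only [if_pos h]
      constructor
      · intro hc; cases hc
      · intro hc; exfalso; have := hc w (Or.inl rfl); omega
    · simp only [if_neg h, ih]
      constructor
      · intro hc y hy; cases hy with
        | inl he => subst he; omega
        | inr hy => exact hc y hy
      · intro hc y hy; exact hc y (Or.inr hy)

theorem pv_core (seg : List Int) :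
    pvOuter seg [3, 2, 1] =
      match PySem.List.min? seg (fun x => x) with
      | none => 3
      | some m => if m ≥ 3 then (3:Int) else if m ≥ 2 then 2 else if m ≥ 1 then 1 else 0 := by
  cases hm : PySem.List.min? seg (fun x => x) with
  | none =>
    have h : seg = [] := (PySem.List.min?_eq_none_iff _ _).1 hm
    subst h; simp [pvOuter, pvFitted]
  | some m =>
    have hmem : m ∈ seg := PySem.List.min?_mem hm
    have hmin : ∀ y ∈ seg, m ≤ y := by
      intro y hy; exact PySem.List.min?_isMin hm y hy
    have hfit : ∀ t : Int, pvFitted t seg = true ↔ t ≤ m := by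
      intro t
      rw [pvFitted_iff]
      constructor
      · intro h; exact h m hmem
      · intro h y hy; exact le_trans h (hmin y hy)
    simp only [pvOuter]
    by_cases h3 : (3:Int) ≤ m
    · rw [if_pos ((hfit 3).2 h3)]
      simp [show m ≥ 3 from h3]
    · rw [if_neg (by simp [hfit]; omega)]
      by_cases h2 : (2:Int) ≤ m
      · rw [if_pos ((hfit 2).2 h2)]
        simp [show ¬ m ≥ 3 from h3, show m ≥ 2 from h2]
      · rw [if_neg (by simp [hfit]; omega)]
        by_cases h1 : (1:Int) ≤ m
        · rw [if_pos ((hfit 1).2 h1)]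
          simp [show ¬ m ≥ 3 from h3, show ¬ m ≥ 2 from h2, show m ≥ 1 from h1]
        · rw [if_neg (by simp [hfit]; omega)]
          simp [show ¬ m ≥ 3 from h3, show ¬ m ≥ 2 from h2, show ¬ m ≥ 1 from h1]

-- ===== VERDICT (by name: the statement is the Claim_ definition above) =====
theorem maximumVehicleWidth_spec : Claim_equal_maximumVehicleWidth := by
  intro sw i j _
  unfold Spec_maximumVehicleWidth maximumVehicleWidth maximumVehicleWidth_alt
  exact pv_core _
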